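-- pv_equiv track=rewrite | github.com/jeancarlo073/LotomaniaIA | lotomania_ia.py | analisar_frequencia_lotomania
-- ===== SOURCE A (Python) =====
-- from collections import Counter
--
-- NUM_DEZENAS_TOTAL = 100 # De 00 a 99
--
-- def analisar_frequencia_lotomania(historico_dezenas_list):
--     """
--     Analisa a frequência e o atraso dos números sorteados.
--     historico_dezenas_list: Uma lista de listas de dezenas (ex: [[0,1,...],[50,60,...]]).
--     """
--     frequencias = Counter()
--     atrasos_corretos = {num: 0 for num in range(NUM_DEZENAS_TOTAL)}
--
--     for sorteio in historico_dezenas_list: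
--         for numero in sorteio:
--             frequencias[numero] += 1
--
--     # Garante que todos os números de 0 a 99 estejam nas frequências, mesmo que com 0
--     for i in range(NUM_DEZENAS_TOTAL):
--         if i not in frequencias:
--             frequencias[i] = 0
--
--     if historico_dezenas_list:
--         for num_loteria in range(NUM_DEZENAS_TOTAL):
--             count_atraso = 0
--             # Percorre o histórico do mais recente para o mais antigo para calcular o atraso
--             for sorteio in reversed(historico_dezenas_list):
--                 if num_loteria in sorteio:
--                     break
--                 count_atraso += 1
--             atrasos_corretos[num_loteria] = count_atraso
--
--     return frequencias, atrasos_corretos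
-- ===== SOURCE B (Python) =====
-- from collections import Counter
--
-- NUM_DEZENAS_TOTAL = 100  # De 00 a 99
--
-- def analisar_frequencia_lotomania(historico_dezenas_list):
--     # One flat Counter pass for frequencies; ONE reverse pass over the history
--     # assigning each number's delay at its first (most recent) sighting.
--     frequencias = Counter(numero for sorteio in historico_dezenas_list
--                           for numero in sorteio)
--     for i in range(NUM_DEZENAS_TOTAL):
--         frequencias.setdefault(i, 0)
--
--     n = len(historico_dezenas_list)
--     ultima_vista = {}
--     pendentes = set(range(NUM_DEZENAS_TOTAL))
--     for atras, sorteio in enumerate(reversed(historico_dezenas_list)):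
--         for numero in sorteio:
--             if numero in pendentes:
--                 ultima_vista[numero] = atras
--                 pendentes.discard(numero)
--
--     atrasos = {num: ultima_vista.get(num, n) for num in range(NUM_DEZENAS_TOTAL)}
--     return frequencias, atrasos
-- ===== Notes on version B (the rewrite author's own statement) =====
-- stated objective: alternative
-- what changed: Delays are computed in a single reverse pass that assigns each number's delay at its first (most recent) sighting and removes it from a pending set, instead of re-scanning the history once per each of the 100 numbers (A breaks at the first hit); frequencies come from one flat Counter pass.
import Mathlib
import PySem

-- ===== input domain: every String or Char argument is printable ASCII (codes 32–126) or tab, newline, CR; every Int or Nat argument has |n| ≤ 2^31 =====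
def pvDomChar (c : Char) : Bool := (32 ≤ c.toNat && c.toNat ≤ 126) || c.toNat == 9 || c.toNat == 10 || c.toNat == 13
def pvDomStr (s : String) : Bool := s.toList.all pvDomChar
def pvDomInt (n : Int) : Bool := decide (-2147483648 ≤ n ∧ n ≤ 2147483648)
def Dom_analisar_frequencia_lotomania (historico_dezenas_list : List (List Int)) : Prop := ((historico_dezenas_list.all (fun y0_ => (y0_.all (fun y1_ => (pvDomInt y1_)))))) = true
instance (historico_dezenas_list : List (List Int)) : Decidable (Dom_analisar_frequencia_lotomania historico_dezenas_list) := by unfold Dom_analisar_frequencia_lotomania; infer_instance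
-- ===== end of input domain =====

-- B replaces A's per-number rescans of the whole history (delay part) by a single reverse
-- pass that assigns each number's delay at its first sighting; objective: alternative.

-- ===== PORT A =====
-- inner 'for sorteio in reversed(...): if num in sorteio: break; count += 1' loop of A
def pvAtrasoA (num : Int) : Int → List (List Int) → Int
  | count, [] => count
  | count, s :: rest => if s.contains num then count else pvAtrasoA num (count + 1) rest

def analisar_frequencia_lotomania (historico_dezenas_list : List (List Int)) : (List (Int × Int)) × (List (Int × Int)) :=
  let frequencias : PySem.Dict Int Int :=
    historico_dezenas_list.foldl
      (fun d sorteio => sorteio.foldl (fun d numero => d.modify numero 0 (· + 1)) d)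
      PySem.Dict.empty
  let atrasos_corretos : PySem.Dict Int Int :=
    (PySem.List.pyRange 0 100 1).foldl (fun d num => d.insert num 0) PySem.Dict.empty
  let frequencias :=
    (PySem.List.pyRange 0 100 1).foldl
      (fun d i => if d.contains i then d else d.insert i 0) frequencias
  let atrasos_corretos :=
    if historico_dezenas_list.isEmpty then atrasos_corretos
    else
      (PySem.List.pyRange 0 100 1).foldl
        (fun d num_loteria =>
          d.insert num_loteria (pvAtrasoA num_loteria 0 historico_dezenas_list.reverse))
        atrasos_corretos
  (frequencias.items, atrasos_corretos.items)

-- ===== PORT B =====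
-- body of B's inner 'for numero in sorteio: if numero in pendentes: …'
def pvMarca (atras : Int) (st : PySem.Dict Int Int × PySem.Set Int) (numero : Int) : PySem.Dict Int Int × PySem.Set Int :=
  if PySem.Set.contains st.2 numero then (st.1.insert numero atras, PySem.Set.discard st.2 numero) else st

-- one step of B's 'for atras, sorteio in enumerate(reversed(...))' loop
def pvPasso (st : PySem.Dict Int Int × PySem.Set Int) (p : Int × List Int) : PySem.Dict Int Int × PySem.Set Int :=
  p.2.foldl (pvMarca p.1) st

def analisar_frequencia_lotomania_alt (historico_dezenas_list : List (List Int)) : (List (Int × Int)) × (List (Int × Int)) :=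
  let frequencias : PySem.Dict Int Int :=
    PySem.Dict.counter (historico_dezenas_list.flatMap (fun sorteio => sorteio))
  let frequencias :=
    (PySem.List.pyRange 0 100 1).foldl (fun d i => d.setdefault i 0) frequencias
  let n : Int := historico_dezenas_list.length
  let st :=
    (PySem.List.enumerate historico_dezenas_list.reverse 0).foldl pvPasso
      ((PySem.Dict.empty : PySem.Dict Int Int), PySem.Set.ofList (PySem.List.pyRange 0 100 1))
  let atrasos :=
    (PySem.List.pyRange 0 100 1).foldl
      (fun d num => d.insert num (st.1.getD num n)) PySem.Dict.empty
  (frequencias.items, atrasos.items)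

-- ===== PRECONDITION & SPEC =====
def Spec_analisar_frequencia_lotomania (historico_dezenas_list : List (List Int)) (out : (List (Int × Int)) × (List (Int × Int))) : Prop := out = analisar_frequencia_lotomania_alt historico_dezenas_list
instance (historico_dezenas_list : List (List Int)) (out : (List (Int × Int)) × (List (Int × Int))) : Decidable (Spec_analisar_frequencia_lotomania historico_dezenas_list out) := by unfold Spec_analisar_frequencia_lotomania; infer_instance

-- ===== CLAIM (what is proved, stated in full; the proofs are below) =====
def Claim_equal_analisar_frequencia_lotomania : Prop := ∀ (historico_dezenas_list : List (List Int)), Dom_analisar_frequencia_lotomania historico_dezenas_list → Spec_analisar_frequencia_lotomania historico_dezenas_list (analisar_frequencia_lotomania historico_dezenas_list)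

-- ===== LEMMAS AND PROOFS =====

-- A's nested count loop equals the fold over the flattened history
lemma pvFoldFlat {α β : Type} (f : β → α → β) (hs : List (List α)) : ∀ d : β,
    hs.foldl (fun d s => s.foldl f d) d = (hs.flatMap (fun s => s)).foldl f d := by
  induction hs with
  | nil => intro d; rfl
  | cons s t ih => intro d; simp [List.foldl_append, ih]

-- A's 'if i not in d: d[i] = 0' loop equals B's setdefault loop
lemma pvFill (l : List Int) (d : PySem.Dict Int Int) :
    l.foldl (fun d i => if d.contains i then d else d.insert i 0) d
      = l.foldl (fun d i => d.setdefault i 0) d := by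
  refine PySem.List.foldl_congr_mem l _ _ d ?_
  intro acc x _
  by_cases hc : acc.contains x = true
  · rw [if_pos hc, PySem.Dict.setdefault_of_contains _ _ hc]
  · have hc' : acc.contains x = false := by simpa using hc
    rw [if_neg hc, PySem.Dict.setdefault_of_not_contains _ _ hc']

lemma pvGetD_foldl_insert_not_mem (g : Int → Int) (l : List Int) (k v : Int) :
    ∀ d : PySem.Dict Int Int, k ∉ l →
      (l.foldl (fun d x => d.insert x (g x)) d).getD k v = d.getD k v := by
  induction l with
  | nil => intro d _; rfl
  | cons x t ih =>
    intro d hk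
    simp only [List.mem_cons, not_or] at hk
    simp only [List.foldl_cons]
    rw [ih _ hk.2]
    exact PySem.Dict.getD_insert_of_ne _ _ _ hk.1

lemma pvGetD_foldl_insert_mem (g : Int → Int) (l : List Int) (k v : Int) :
    ∀ d : PySem.Dict Int Int, k ∈ l →
      (l.foldl (fun d x => d.insert x (g x)) d).getD k v = g k := by
  induction l with
  | nil => intro d hk; exact absurd hk (List.not_mem_nil)
  | cons x t ih =>
    intro d hk
    simp only [List.foldl_cons]
    by_cases ht : k ∈ t
    · exact ih _ ht
    · have hx : k = x := by rcases List.mem_cons.mp hk with h | h; exact h; exact absurd h ht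
      subst hx
      rw [pvGetD_foldl_insert_not_mem g t k v _ ht]
      exact PySem.Dict.getD_insert_self _ _ _ _

lemma pvUpdate_self (l : List Int) :
    PySem.Set.update (PySem.Set.ofList l) l = PySem.Set.ofList l := by
  rw [PySem.Set.update_eq_append_filter]
  have h : (List.filter (fun y => !(PySem.Set.ofList l).contains y) (PySem.Set.ofList l)) = [] := by
    apply List.filter_eq_nil_iff.mpr
    intro a ha
    have ha' : a ∈ l := (PySem.Set.mem_ofList l a).mp ha
    simp [ha']
  rw [h, List.append_nil]

lemma pvAtrasoA_shift (k : Int) (L : List (List Int)) : ∀ c : Int,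
    pvAtrasoA k c L = c + pvAtrasoA k 0 L := by
  induction L with
  | nil => intro c; simp [pvAtrasoA]
  | cons s t ih =>
    intro c
    by_cases hs : s.contains k = true
    · simp only [pvAtrasoA]; rw [if_pos hs, if_pos hs]; omega
    · simp only [pvAtrasoA]; rw [if_neg hs, if_neg hs, ih (c + 1), ih (0 + 1)]; ring

lemma pvAtrasoA_absent (k : Int) (L : List (List Int)) (h : ∀ s ∈ L, k ∉ s) : ∀ c : Int,
    pvAtrasoA k c L = c + (L.length : Int) := by
  induction L with
  | nil => intro c; simp [pvAtrasoA]
  | cons s t ih =>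
    intro c
    have hks : k ∉ s := h s (by simp)
    simp only [pvAtrasoA]
    rw [if_neg (by simpa using hks), ih (fun u hu => h u (List.mem_cons_of_mem _ hu)) (c + 1)]
    simp only [List.length_cons]
    push_cast
    ring

-- invariant of B's inner loop (one draw, delay index i)
lemma pvInner (i : Int) (s : List Int) : ∀ (st : PySem.Dict Int Int × PySem.Set Int) (k : Int),
    ((k ∉ st.2 → (s.foldl (pvMarca i) st).1.get? k = st.1.get? k ∧ k ∉ (s.foldl (pvMarca i) st).2)
   ∧ (k ∈ st.2 → k ∉ s → (s.foldl (pvMarca i) st).1.get? k = st.1.get? k ∧ k ∈ (s.foldl (pvMarca i) st).2)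
   ∧ (k ∈ st.2 → k ∈ s → (s.foldl (pvMarca i) st).1.get? k = some i ∧ k ∉ (s.foldl (pvMarca i) st).2)) := by
  induction s with
  | nil =>
    intro st k
    exact ⟨fun h => ⟨rfl, h⟩, fun h _ => ⟨rfl, h⟩, fun _ h => absurd h (List.not_mem_nil)⟩
  | cons x t ih =>
    intro st k
    simp only [List.foldl_cons]
    by_cases hcx : x ∈ st.2
    · have hc : PySem.Set.contains st.2 x = true := (PySem.Set.contains_iff st.2 x).mpr hcx
      have hst : pvMarca i st x = (st.1.insert x i, PySem.Set.discard st.2 x) := by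
        simp only [pvMarca]; rw [if_pos hc]
      rw [hst]
      refine ⟨?_, ?_, ?_⟩
      · intro hk
        have hne : k ≠ x := fun h => hk (h ▸ hcx)
        have hk' : k ∉ PySem.Set.discard st.2 x :=
          fun h => hk ((PySem.Set.mem_discard st.2 x k).mp h).1
        have h2 := (ih (st.1.insert x i, PySem.Set.discard st.2 x) k).1 hk'
        exact ⟨h2.1.trans (PySem.Dict.get?_insert_of_ne _ _ hne), h2.2⟩
      · intro hk hks
        have hne : k ≠ x := fun h => hks (h ▸ List.mem_cons_self)
        have hkt : k ∉ t := fun h => hks (List.mem_cons_of_mem _ h)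
        have hk' : k ∈ PySem.Set.discard st.2 x := (PySem.Set.mem_discard st.2 x k).mpr ⟨hk, hne⟩
        have h2 := (ih (st.1.insert x i, PySem.Set.discard st.2 x) k).2.1 hk' hkt
        exact ⟨h2.1.trans (PySem.Dict.get?_insert_of_ne _ _ hne), h2.2⟩
      · intro hk hks
        by_cases hex : k = x
        · subst hex
          have hk' : k ∉ PySem.Set.discard st.2 k :=
            fun h => ((PySem.Set.mem_discard st.2 k k).mp h).2 rfl
          have h2 := (ih (st.1.insert k i, PySem.Set.discard st.2 k) k).1 hk'
          exact ⟨h2.1.trans (PySem.Dict.get?_insert_self _ _ _), h2.2⟩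
        · have hkt : k ∈ t := by
            rcases List.mem_cons.mp hks with h | h
            · exact absurd h hex
            · exact h
          have hk' : k ∈ PySem.Set.discard st.2 x := (PySem.Set.mem_discard st.2 x k).mpr ⟨hk, hex⟩
          exact (ih (st.1.insert x i, PySem.Set.discard st.2 x) k).2.2 hk' hkt
    · have hc : ¬(PySem.Set.contains st.2 x = true) :=
        fun h => hcx ((PySem.Set.contains_iff st.2 x).mp h)
      have hst : pvMarca i st x = st := by simp only [pvMarca]; rw [if_neg hc]
      rw [hst]
      refine ⟨fun hk => (ih st k).1 hk, fun hk hks => ?_, fun hk hks => ?_⟩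
      · exact (ih st k).2.1 hk (fun h => hks (List.mem_cons_of_mem _ h))
      · have hkt : k ∈ t := by
          rcases List.mem_cons.mp hks with h | h
          · exact absurd (h ▸ hk) hcx
          · exact h
        exact (ih st k).2.2 hk hkt

-- invariant of B's outer (enumerate) loop: the recorded delay equals A's rescan count
lemma pvOuter (L : List (List Int)) : ∀ (b : Int) (st : PySem.Dict Int Int × PySem.Set Int) (k : Int),
    ((k ∉ st.2 → ((PySem.List.enumerate L b).foldl pvPasso st).1.get? k = st.1.get? k ∧ k ∉ ((PySem.List.enumerate L b).foldl pvPasso st).2)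
   ∧ (k ∈ st.2 → (∀ s ∈ L, k ∉ s) → ((PySem.List.enumerate L b).foldl pvPasso st).1.get? k = st.1.get? k ∧ k ∈ ((PySem.List.enumerate L b).foldl pvPasso st).2)
   ∧ (k ∈ st.2 → (∃ s ∈ L, k ∈ s) → ((PySem.List.enumerate L b).foldl pvPasso st).1.get? k = some (b + pvAtrasoA k 0 L) ∧ k ∉ ((PySem.List.enumerate L b).foldl pvPasso st).2)) := by
  induction L with
  | nil =>
    intro b st k
    exact ⟨fun h => ⟨rfl, h⟩, fun h _ => ⟨rfl, h⟩, fun _ h => absurd h (by simp)⟩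
  | cons s t ih =>
    intro b st k
    rw [PySem.List.enumerate_cons]
    simp only [List.foldl_cons]
    have hstep : pvPasso st (b, s) = s.foldl (pvMarca b) st := rfl
    rw [hstep]
    set st' := s.foldl (pvMarca b) st with hst'
    refine ⟨?_, ?_, ?_⟩
    · intro hk
      have h1 := (pvInner b s st k).1 hk
      have h2 := (ih (b + 1) st' k).1 h1.2
      exact ⟨h2.1.trans h1.1, h2.2⟩
    · intro hk hks
      have hkns : k ∉ s := hks s List.mem_cons_self
      have h1 := (pvInner b s st k).2.1 hk hkns
      have h2 := (ih (b + 1) st' k).2.1 h1.2 (fun u hu => hks u (List.mem_cons_of_mem _ hu))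
      exact ⟨h2.1.trans h1.1, h2.2⟩
    · intro hk hks
      by_cases hins : k ∈ s
      · have hcs : s.contains k = true := by simpa using hins
        have h1 := (pvInner b s st k).2.2 hk hins
        have h2 := (ih (b + 1) st' k).1 h1.2
        have hval : b + pvAtrasoA k 0 (s :: t) = b := by
          simp only [pvAtrasoA]; rw [if_pos hcs]; ring
        rw [hval]
        exact ⟨h2.1.trans h1.1, h2.2⟩
      · have hcs : ¬(s.contains k = true) := by simpa using hins
        have h1 := (pvInner b s st k).2.1 hk hins
        have hex : ∃ u ∈ t, k ∈ u := by
          rcases hks with ⟨u, hu, hku⟩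
          rcases List.mem_cons.mp hu with h | h
          · exact absurd (h ▸ hku) hins
          · exact ⟨u, h, hku⟩
        have h2 := (ih (b + 1) st' k).2.2 h1.2 hex
        have hval : b + pvAtrasoA k 0 (s :: t) = b + 1 + pvAtrasoA k 0 t := by
          simp only [pvAtrasoA]; rw [if_neg hcs, pvAtrasoA_shift k t (0 + 1)]; ring
        rw [hval]
        exact ⟨h2.1, h2.2⟩

-- the two delay dicts have the same items (A side = B side), any history
set_option maxRecDepth 16384 in
lemma pvAtrItems (h : List (List Int)) :
    ((PySem.List.pyRange 0 100 1).foldl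
        (fun d num => d.insert num (pvAtrasoA num 0 h.reverse))
        ((PySem.List.pyRange 0 100 1).foldl (fun d num => d.insert num 0) PySem.Dict.empty)).items
  = ((PySem.List.pyRange 0 100 1).foldl
        (fun d num => d.insert num
          (((PySem.List.enumerate h.reverse 0).foldl pvPasso
             (PySem.Dict.empty, PySem.Set.ofList (PySem.List.pyRange 0 100 1))).1.getD num (h.length : Int)))
        PySem.Dict.empty).items := by
  have hkA : ((PySem.List.pyRange 0 100 1).foldl
        (fun d num => d.insert num (pvAtrasoA num 0 h.reverse))
        ((PySem.List.pyRange 0 100 1).foldl (fun d num => d.insert num 0) PySem.Dict.empty)).keys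
      = PySem.Set.ofList (PySem.List.pyRange 0 100 1) := by
    simp only [PySem.Dict.keys_foldl_insert, PySem.Dict.keys_empty, PySem.Set.update_nil_left,
      pvUpdate_self]
  have hkB : ((PySem.List.pyRange 0 100 1).foldl
        (fun d num => d.insert num
          (((PySem.List.enumerate h.reverse 0).foldl pvPasso
             (PySem.Dict.empty, PySem.Set.ofList (PySem.List.pyRange 0 100 1))).1.getD num (h.length : Int)))
        PySem.Dict.empty).keys
      = PySem.Set.ofList (PySem.List.pyRange 0 100 1) := by
    simp only [PySem.Dict.keys_foldl_insert, PySem.Dict.keys_empty, PySem.Set.update_nil_left]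
  rw [PySem.Dict.items_eq_map_keys _ (by rw [hkA]; exact PySem.Set.nodup_ofList _) 0,
      PySem.Dict.items_eq_map_keys _ (by rw [hkB]; exact PySem.Set.nodup_ofList _) 0,
      hkA, hkB]
  apply List.map_congr_left
  intro k hkmem
  simp only [Prod.mk.injEq]
  refine ⟨trivial, ?_⟩
  have hkR : k ∈ PySem.List.pyRange 0 100 1 := (PySem.Set.mem_ofList _ k).mp hkmem
  have hA : ((PySem.List.pyRange 0 100 1).foldl
        (fun d num => d.insert num (pvAtrasoA num 0 h.reverse))
        ((PySem.List.pyRange 0 100 1).foldl (fun d num => d.insert num 0) PySem.Dict.empty)).getD k 0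
      = pvAtrasoA k 0 h.reverse := pvGetD_foldl_insert_mem _ _ k 0 _ hkR
  have hB : ((PySem.List.pyRange 0 100 1).foldl
        (fun d num => d.insert num
          (((PySem.List.enumerate h.reverse 0).foldl pvPasso
             (PySem.Dict.empty, PySem.Set.ofList (PySem.List.pyRange 0 100 1))).1.getD num (h.length : Int)))
        PySem.Dict.empty).getD k 0
      = ((PySem.List.enumerate h.reverse 0).foldl pvPasso
             (PySem.Dict.empty, PySem.Set.ofList (PySem.List.pyRange 0 100 1))).1.getD k (h.length : Int) :=
    pvGetD_foldl_insert_mem _ _ k 0 _ hkR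
  rw [hA, hB]
  by_cases hex : ∃ s ∈ h.reverse, k ∈ s
  · have ho := (pvOuter h.reverse 0
        ((PySem.Dict.empty : PySem.Dict Int Int), PySem.Set.ofList (PySem.List.pyRange 0 100 1)) k).2.2
        hkmem hex
    rw [PySem.Dict.getD_eq_get?_getD, ho.1]
    simp
  · push_neg at hex
    have ho := (pvOuter h.reverse 0
        ((PySem.Dict.empty : PySem.Dict Int Int), PySem.Set.ofList (PySem.List.pyRange 0 100 1)) k).2.1
        hkmem hex
    rw [PySem.Dict.getD_eq_get?_getD, ho.1, pvAtrasoA_absent k h.reverse hex 0]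
    simp

set_option maxRecDepth 16384 in
theorem pv_main : ∀ h : List (List Int),
    analisar_frequencia_lotomania h = analisar_frequencia_lotomania_alt h := by
  intro h
  simp only [analisar_frequencia_lotomania, analisar_frequencia_lotomania_alt, Prod.mk.injEq]
  constructor
  · rw [PySem.Dict.counter_eq_foldl, ← pvFoldFlat, pvFill]
  · by_cases hemp : h = []
    · subst hemp
      simp [PySem.Dict.getD_empty]
    · rw [if_neg (by simp [hemp])]
      exact pvAtrItems h

-- ===== VERDICT (by name: the statement is the Claim_ definition above) =====
set_option maxRecDepth 16384 in
theorem analisar_frequencia_lotomania_spec : Claim_equal_analisar_frequencia_lotomania := by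
  intro h _
  exact pv_main h
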